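-- pv_equiv track=rewrite | github.com/kivimedia/team-content-engine | src/tce/services/repo_service.py | classify_commit
-- ===== SOURCE A (Python) =====
-- _COMMIT_PATTERNS: list[tuple[str, str]] = [
--     ("feat:", "feature"),
--     ("feature:", "feature"),
--     ("feat(", "feature"),
--     ("fix:", "fix"),
--     ("bug:", "fix"),
--     ("bugfix:", "fix"),
--     ("hotfix:", "fix"),
--     ("fix(", "fix"),
--     ("perf:", "perf"),
--     ("perf(", "perf"),
--     ("refactor:", "refactor"),
--     ("refactor(", "refactor"),
--     ("chore:", "chore"),
--     ("chore(", "chore"),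
--     ("docs:", "docs"),
--     ("docs(", "docs"),
--     ("test:", "test"),
--     ("test(", "test"),
--     ("style:", "style"),
--     ("ci:", "ci"),
-- ]
--
-- def classify_commit(subject: str) -> str:
--     """Classify a commit subject line into a bucket."""
--     lowered = subject.lstrip().lower()
--     for prefix, bucket in _COMMIT_PATTERNS:
--         if lowered.startswith(prefix):
--             return bucket
--     # Heuristic fallback for non-conventional commits
--     if any(w in lowered for w in ("fix ", " fix", "bug", "hotfix", "patch")):
--         return "fix"
--     if any(w in lowered for w in ("add ", "new ", "introduce ", "implement ", "support ")):
--         return "feature"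
--     return "other"
-- ===== SOURCE B (Python) =====
-- _PREFIX_BUCKETS = {
--     "feat:": "feature", "feature:": "feature", "feat(": "feature",
--     "fix:": "fix", "bug:": "fix", "bugfix:": "fix", "hotfix:": "fix", "fix(": "fix",
--     "perf:": "perf", "perf(": "perf",
--     "refactor:": "refactor", "refactor(": "refactor",
--     "chore:": "chore", "chore(": "chore",
--     "docs:": "docs", "docs(": "docs",
--     "test:": "test", "test(": "test",
--     "style:": "style", "ci:": "ci",
-- }
--
-- _FALLBACKS = (
--     ("fix", ("fix ", " fix", "bug", "hotfix", "patch")),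
--     ("feature", ("add ", "new ", "introduce ", "implement ", "support ")),
-- )
--
-- def classify_commit(subject: str) -> str:
--     """Classify a commit subject line into a bucket."""
--     lowered = subject.lstrip().lower()
--     head = []
--     for ch in lowered:
--         head.append(ch)
--         if ch in ":(":
--             bucket = _PREFIX_BUCKETS.get("".join(head))
--             if bucket is not None:
--                 return bucket
--             break
--     for bucket, words in _FALLBACKS:
--         if any(w in lowered for w in words):
--             return bucket
--     return "other"
-- ===== Notes on version B (the rewrite author's own statement) =====
-- stated objective: alternative
-- what changed: Replaces the 20-pattern startswith loop by scanning the subject up to its first delimiter character (colon or open parenthesis) and doing one dict lookup of that prefix, with the heuristic fallback rewritten as a data-driven table loop.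
import Mathlib
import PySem

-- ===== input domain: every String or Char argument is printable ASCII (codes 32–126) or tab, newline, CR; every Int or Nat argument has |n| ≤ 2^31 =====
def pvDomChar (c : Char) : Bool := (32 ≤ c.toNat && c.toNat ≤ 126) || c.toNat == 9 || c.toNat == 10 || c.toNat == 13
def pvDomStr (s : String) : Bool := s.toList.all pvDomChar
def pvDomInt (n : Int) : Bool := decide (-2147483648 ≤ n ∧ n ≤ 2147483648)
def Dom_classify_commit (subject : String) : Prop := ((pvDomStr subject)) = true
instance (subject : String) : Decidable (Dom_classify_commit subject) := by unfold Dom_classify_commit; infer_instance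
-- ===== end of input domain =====

-- B replaces the 20-pattern startswith scan by a parse-to-first-delimiter (colon or open paren) plus one dict lookup,
-- with a table-driven fallback: a different decomposition (no speed claim).


-- ===== PORT A =====
def pvCommitPatterns : List (String × String) :=
  [("feat:", "feature"), ("feature:", "feature"), ("feat(", "feature"),
   ("fix:", "fix"), ("bug:", "fix"), ("bugfix:", "fix"), ("hotfix:", "fix"), ("fix(", "fix"),
   ("perf:", "perf"), ("perf(", "perf"),
   ("refactor:", "refactor"), ("refactor(", "refactor"),
   ("chore:", "chore"), ("chore(", "chore"),
   ("docs:", "docs"), ("docs(", "docs"),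
   ("test:", "test"), ("test(", "test"),
   ("style:", "style"), ("ci:", "ci")]

-- A's for-loop with early return
def pvALoop : List (String × String) → List Char → Option String
  | [], _ => none
  | (p, b) :: ps, l => if PySem.Chars.startswith l p.toList then some b else pvALoop ps l

def classify_commit (subject : String) : String :=
  let lowered := PySem.Chars.lower (PySem.Chars.lstrip subject.toList)
  match pvALoop pvCommitPatterns lowered with
  | some b => b
  | none =>
    if ["fix ", " fix", "bug", "hotfix", "patch"].any
        (fun w => PySem.Chars.isIn w.toList lowered) then "fix"
    else if ["add ", "new ", "introduce ", "implement ", "support "].any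
        (fun w => PySem.Chars.isIn w.toList lowered) then "feature"
    else "other"

-- ===== PORT B =====
def pvPrefixBuckets : List (String × String) :=
  [("feat:", "feature"), ("feature:", "feature"), ("feat(", "feature"),
   ("fix:", "fix"), ("bug:", "fix"), ("bugfix:", "fix"), ("hotfix:", "fix"), ("fix(", "fix"),
   ("perf:", "perf"), ("perf(", "perf"),
   ("refactor:", "refactor"), ("refactor(", "refactor"),
   ("chore:", "chore"), ("chore(", "chore"),
   ("docs:", "docs"), ("docs(", "docs"),
   ("test:", "test"), ("test(", "test"),
   ("style:", "style"), ("ci:", "ci")]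

def pvFallbacks : List (String × List String) :=
  [("fix", ["fix ", " fix", "bug", "hotfix", "patch"]),
   ("feature", ["add ", "new ", "introduce ", "implement ", "support "])]

-- dict.get on the prefix table (key held as the char list of the joined head)
def pvDictGet : List (String × String) → List Char → Option String
  | [], _ => none
  | (k, v) :: rest, key => if k.toList == key then some v else pvDictGet rest key

-- B's scan to the first ':' or '(' (none = fall through to the fallback table)
def pvBScan (acc : List Char) : List Char → Option String
  | [] => none
  | c :: rest =>
    if c == ':' || c == '(' then pvDictGet pvPrefixBuckets (acc ++ [c])
    else pvBScan (acc ++ [c]) rest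

def pvFbLoop : List (String × List String) → List Char → String
  | [], _ => "other"
  | (b, ws) :: rest, l =>
    if ws.any (fun w => PySem.Chars.isIn w.toList l) then b else pvFbLoop rest l

def classify_commit_alt (subject : String) : String :=
  let lowered := PySem.Chars.lower (PySem.Chars.lstrip subject.toList)
  match pvBScan [] lowered with
  | some b => b
  | none => pvFbLoop pvFallbacks lowered

-- ===== PRECONDITION & SPEC =====
def Spec_classify_commit (subject : String) (out : String) : Prop := out = classify_commit_alt subject
instance (subject : String) (out : String) : Decidable (Spec_classify_commit subject out) := by unfold Spec_classify_commit; infer_instance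

-- ===== CLAIM (what is proved, stated in full; the proofs are below) =====
def Claim_equal_classify_commit : Prop := ∀ (subject : String), Dom_classify_commit subject → Spec_classify_commit subject (classify_commit subject)

-- ===== LEMMAS AND PROOFS =====

def pvDelim (c : Char) : Bool := c == ':' || c == '('

-- every pattern key = nondelimiter chars followed by one delimiter
def pvGoodKeyB (p : String) : Bool :=
  match p.toList.reverse with
  | [] => false
  | d :: w => pvDelim d && w.all (fun c => !pvDelim c)

lemma pvGoodKeyB_spec (p : String) (h : pvGoodKeyB p = true) :
    ∃ w d, p.toList = w ++ [d] ∧ w.all (fun c => !pvDelim c) = true ∧ pvDelim d = true := by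
  unfold pvGoodKeyB at h
  rcases hr : p.toList.reverse with _ | ⟨d, w⟩
  · rw [hr] at h; simp at h
  · rw [hr] at h
    refine ⟨w.reverse, d, ?_, ?_, ?_⟩
    · have := congrArg List.reverse hr
      simpa using this
    · simp only [Bool.and_eq_true, List.all_reverse] at h ⊢; exact h.2
    · simp only [Bool.and_eq_true] at h; exact h.1

lemma pvPatterns_good : pvCommitPatterns.all (fun pr => pvGoodKeyB pr.1) = true := by decide

-- a good key prefixing a nondelim-then-delim string must be exactly acc ++ [c]
lemma pvKeyShape : ∀ (w acc : List Char) (d c : Char) (rest : List Char),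
    w.all (fun x => !pvDelim x) = true → acc.all (fun x => !pvDelim x) = true →
    pvDelim d = true → pvDelim c = true →
    (w ++ [d]) <+: (acc ++ c :: rest) → w = acc ∧ d = c := by
  intro w
  induction w with
  | nil =>
    intro acc d c rest _ hacc hd hc hp
    cases acc with
    | nil =>
      simp only [List.nil_append, List.cons_prefix_cons] at hp
      exact ⟨rfl, hp.1⟩
    | cons a acc' =>
      simp only [List.nil_append, List.cons_append, List.cons_prefix_cons] at hp
      simp only [List.all_cons, Bool.and_eq_true] at hacc
      rw [hp.1] at hd
      rw [hd] at hacc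
      simp at hacc
  | cons x w' ih =>
    intro acc d c rest hw hacc hd hc hp
    simp only [List.all_cons, Bool.and_eq_true] at hw
    cases acc with
    | nil =>
      simp only [List.nil_append, List.cons_append, List.cons_prefix_cons] at hp
      rw [hp.1] at hw
      rw [hc] at hw
      simp at hw
    | cons a acc' =>
      simp only [List.cons_append, List.cons_prefix_cons] at hp
      simp only [List.all_cons, Bool.and_eq_true] at hacc
      have := ih acc' d c rest hw.2 hacc.2 hd hc hp.2
      exact ⟨by rw [hp.1, this.1], this.2⟩

-- no good key prefixes an all-nondelimiter string
lemma pvNoMatch_nd (ps : List (String × String)) (hps : ps.all (fun pr => pvGoodKeyB pr.1) = true)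
    (acc : List Char) (hacc : acc.all (fun x => !pvDelim x) = true) :
    pvALoop ps acc = none := by
  induction ps with
  | nil => rfl
  | cons pr ps' ih =>
    obtain ⟨p, b⟩ := pr
    simp only [List.all_cons, Bool.and_eq_true] at hps
    obtain ⟨w, d, hk, hw, hd⟩ := pvGoodKeyB_spec p hps.1
    unfold pvALoop
    have hsw : PySem.Chars.startswith acc p.toList = false := by
      rw [← Bool.not_eq_true]
      intro hcon
      have hpre := (PySem.Chars.startswith_iff ..).1 hcon
      rw [hk] at hpre
      have hmem : d ∈ acc := hpre.subset (by simp)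
      have := List.all_eq_true.1 hacc d hmem
      rw [hd] at this; simp at this
    rw [hsw]
    simp only [Bool.false_eq_true, if_false]
    exact ih hps.2

-- at the first delimiter, A's startswith scan is exactly B's dict lookup of acc ++ [c]
lemma pvALoop_delim (ps : List (String × String)) (hps : ps.all (fun pr => pvGoodKeyB pr.1) = true)
    (acc : List Char) (hacc : acc.all (fun x => !pvDelim x) = true)
    (c : Char) (hc : pvDelim c = true) (rest : List Char) :
    pvALoop ps (acc ++ c :: rest) = pvDictGet ps (acc ++ [c]) := by
  induction ps with
  | nil => rfl
  | cons pr ps' ih =>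
    obtain ⟨p, b⟩ := pr
    simp only [List.all_cons, Bool.and_eq_true] at hps
    obtain ⟨w, d, hk, hw, hd⟩ := pvGoodKeyB_spec p hps.1
    unfold pvALoop pvDictGet
    by_cases hkey : p.toList = acc ++ [c]
    · have hsw : PySem.Chars.startswith (acc ++ c :: rest) p.toList = true := by
        rw [PySem.Chars.startswith_iff, hkey]
        exact ⟨rest, by simp⟩
      rw [hsw, hkey]
      simp
    · have hsw : PySem.Chars.startswith (acc ++ c :: rest) p.toList = false := by
        rw [← Bool.not_eq_true]
        intro hcon
        have hpre := (PySem.Chars.startswith_iff ..).1 hcon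
        rw [hk] at hpre
        obtain ⟨h1, h2⟩ := pvKeyShape w acc d c rest hw hacc hd hc hpre
        exact hkey (by rw [hk, h1, h2])
      rw [hsw]
      have hbeq : (p.toList == acc ++ [c]) = false := by
        simp only [beq_eq_false_iff_ne, ne_eq]; exact hkey
      rw [hbeq]
      simp only [Bool.false_eq_true, if_false]
      exact ih hps.2

-- main scan equivalence, generalised over the nondelimiter prefix already consumed
lemma pvScan_eq : ∀ (l acc : List Char), acc.all (fun x => !pvDelim x) = true →
    pvALoop pvCommitPatterns (acc ++ l) = pvBScan acc l := by
  intro l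
  induction l with
  | nil =>
    intro acc hacc
    simpa using pvNoMatch_nd pvCommitPatterns pvPatterns_good acc hacc
  | cons c rest ih =>
    intro acc hacc
    unfold pvBScan
    by_cases hc : (c == ':' || c == '(') = true
    · rw [hc]
      simp only [if_true]
      exact pvALoop_delim pvCommitPatterns pvPatterns_good acc hacc c hc rest
    · rw [Bool.not_eq_true] at hc
      rw [hc]
      simp only [Bool.false_eq_true, if_false]
      have hacc' : (acc ++ [c]).all (fun x => !pvDelim x) = true := by
        simp only [List.all_append, List.all_cons, List.all_nil, Bool.and_eq_true]
        exact ⟨hacc, by simp [pvDelim, hc], trivial⟩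
      have := ih (acc ++ [c]) hacc'
      simpa using this

lemma pvFallback_eq (l : List Char) :
    (if ["fix ", " fix", "bug", "hotfix", "patch"].any
        (fun w => PySem.Chars.isIn w.toList l) then "fix"
     else if ["add ", "new ", "introduce ", "implement ", "support "].any
        (fun w => PySem.Chars.isIn w.toList l) then "feature"
     else "other") = pvFbLoop pvFallbacks l := by
  simp only [pvFbLoop, pvFallbacks]

-- ===== VERDICT (by name: the statement is the Claim_ definition above) =====
theorem classify_commit_spec : Claim_equal_classify_commit := by
  intro subject _
  unfold Spec_classify_commit classify_commit classify_commit_alt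
  have hscan := pvScan_eq (PySem.Chars.lower (PySem.Chars.lstrip subject.toList)) [] rfl
  simp only [List.nil_append] at hscan
  dsimp only
  rw [hscan, pvFallback_eq]
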